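-- pv_equiv track=rewrite | github.com/Estuardo07/Lab_D | mylib.py | find_replace
-- ===== SOURCE A (Python) =====
-- def is_letter(char):
--     ascii_val = ord(char)
--     return (ascii_val >= 65 and ascii_val <= 90) or (ascii_val >= 97 and ascii_val <= 122)
--
-- def is_digit(char):
--     ascii_val = ord(char)
--     return ascii_val >= 48 and ascii_val <= 57
--
-- def find_replace(string, string_to_replace, string_to_replace_with):
--     words = []
--     word = ""
--     for char in string:
--         if is_letter(char) or is_digit(char):
--             word += char
--         else:
--             if word != "":
--                 words.append(word)
--                 word = ""
--             words.append(char)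
--     if word != "":
--         words.append(word)
--
--     resultado = ""
--     for word in words:
--         if word == string_to_replace:
--             resultado += string_to_replace_with
--         else:
--             resultado += word
--     return resultado
-- ===== SOURCE B (Python) =====
-- def find_replace(string, string_to_replace, string_to_replace_with):
--     # single pass: scan maximal alphanumeric runs in place and emit tokens
--     # directly; no intermediate token list, no second reconstruction pass.
--     def is_alnum(c):
--         return ('A' <= c <= 'Z') or ('a' <= c <= 'z') or ('0' <= c <= '9')
--     out = []
--     i, n = 0, len(string)
--     while i < n:
--         if is_alnum(string[i]):
--             j = i + 1
--             while j < n and is_alnum(string[j]):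
--                 j += 1
--             tok = string[i:j]
--             i = j
--         else:
--             tok = string[i]
--             i += 1
--         out.append(string_to_replace_with if tok == string_to_replace else tok)
--     return ''.join(out)
-- ===== Notes on version B (the rewrite author's own statement) =====
-- stated objective: alternative
-- what changed: Replaced A's two-pass design (character-by-character tokenizer building a full token list, then a second reconstruction loop) with a single index scan that takes each maximal alphanumeric run in one step and emits the replaced-or-kept token directly, never materialising the token list.
import Mathlib
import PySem

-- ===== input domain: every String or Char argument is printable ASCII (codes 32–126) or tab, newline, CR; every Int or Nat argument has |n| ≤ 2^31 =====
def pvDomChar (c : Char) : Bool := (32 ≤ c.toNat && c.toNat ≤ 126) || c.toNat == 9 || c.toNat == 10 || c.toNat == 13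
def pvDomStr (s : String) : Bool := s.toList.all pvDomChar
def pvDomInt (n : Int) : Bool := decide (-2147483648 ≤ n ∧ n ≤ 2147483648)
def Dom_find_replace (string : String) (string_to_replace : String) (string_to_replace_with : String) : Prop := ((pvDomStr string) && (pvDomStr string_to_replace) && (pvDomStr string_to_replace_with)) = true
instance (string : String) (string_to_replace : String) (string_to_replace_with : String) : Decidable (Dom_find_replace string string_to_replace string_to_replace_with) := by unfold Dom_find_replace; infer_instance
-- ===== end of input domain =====

-- B replaces A's two-pass design (tokenize everything into a list, then rebuild) by a
-- single scan that consumes each maximal alphanumeric run at once and emits output directly.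

-- ===== PORT A =====
def fr_is_letter (c : Char) : Bool := (65 ≤ c.toNat && c.toNat ≤ 90) || (97 ≤ c.toNat && c.toNat ≤ 122)
def fr_is_digit (c : Char) : Bool := (48 ≤ c.toNat && c.toNat ≤ 57)

-- one iteration of A's tokenizer loop: state = (words so far, pending word)
def frStep (st : List (List Char) × List Char) (c : Char) : List (List Char) × List Char :=
  if fr_is_letter c || fr_is_digit c then (st.1, st.2 ++ [c])
  else ((if st.2 ≠ [] then st.1 ++ [st.2] else st.1) ++ [[c]], [])

def find_replace (string : String) (string_to_replace : String) (string_to_replace_with : String) : String :=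
  let t := string_to_replace.toList
  let r := string_to_replace_with.toList
  let st := string.toList.foldl frStep ([], [])
  let words := if st.2 ≠ [] then st.1 ++ [st.2] else st.1
  String.mk (words.foldl (fun res w => if w == t then res ++ r else res ++ w) [])

-- ===== PORT B =====
def fr_isAlnum (c : Char) : Bool :=
  (65 ≤ c.toNat && c.toNat ≤ 90) || (97 ≤ c.toNat && c.toNat ≤ 122) || (48 ≤ c.toNat && c.toNat ≤ 57)

-- B's single scan: take a maximal alphanumeric run (or one separator char), emit it
-- (replaced if it equals the target), continue right after it.
def frTok (t r : List Char) : List Char → List Char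
  | [] => []
  | c :: cs =>
    if fr_isAlnum c then
      let run := c :: cs.takeWhile fr_isAlnum
      (if run == t then r else run) ++ frTok t r (cs.dropWhile fr_isAlnum)
    else
      (if [c] == t then r else [c]) ++ frTok t r cs
termination_by cs => cs.length
decreasing_by
  · exact Nat.lt_succ_of_le (List.length_dropWhile_le _ _)
  · exact Nat.lt_succ_self _

def find_replace_alt (string : String) (string_to_replace : String) (string_to_replace_with : String) : String :=
  String.mk (frTok string_to_replace.toList string_to_replace_with.toList string.toList)

-- ===== PRECONDITION & SPEC =====
def Spec_find_replace (string : String) (string_to_replace : String) (string_to_replace_with : String) (out : String) : Prop := out = find_replace_alt string string_to_replace string_to_replace_with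
instance (string : String) (string_to_replace : String) (string_to_replace_with : String) (out : String) : Decidable (Spec_find_replace string string_to_replace string_to_replace_with out) := by unfold Spec_find_replace; infer_instance

-- ===== CLAIM (what is proved, stated in full; the proofs are below) =====
def Claim_equal_find_replace : Prop := ∀ (string : String) (string_to_replace : String) (string_to_replace_with : String), Dom_find_replace string string_to_replace string_to_replace_with → Spec_find_replace string string_to_replace string_to_replace_with (find_replace string string_to_replace string_to_replace_with)

-- ===== LEMMAS AND PROOFS =====

-- token emission: replace the token if it equals the target
def fapp (t r w : List Char) : List Char := if w == t then r else w

-- A's tokenizer-with-pending-word, fused with the emission pass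
def frGlue (t r : List Char) (w : List Char) : List Char → List Char
  | [] => if w ≠ [] then fapp t r w else []
  | c :: cs =>
    if fr_is_letter c || fr_is_digit c then frGlue t r (w ++ [c]) cs
    else (if w ≠ [] then fapp t r w else []) ++ fapp t r [c] ++ frGlue t r [] cs

theorem foldl_fapp (t r : List Char) (ws : List (List Char)) (acc : List Char) :
    ws.foldl (fun res w => if w == t then res ++ r else res ++ w) acc
      = acc ++ ws.flatMap (fapp t r) := by
  have h : (fun (res : List Char) (w : List Char) => if w == t then res ++ r else res ++ w)
      = fun res w => res ++ fapp t r w := by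
    funext res w; unfold fapp; split <;> rfl
  rw [h, PySem.List.foldl_append_eq_flatMap]

-- A's loop, fused with emission, equals frGlue
theorem foldA_glue (t r : List Char) (cs : List Char) :
    ∀ (ws : List (List Char)) (w : List Char),
      (let st := cs.foldl frStep (ws, w)
       (if st.2 ≠ [] then st.1 ++ [st.2] else st.1).flatMap (fapp t r))
        = ws.flatMap (fapp t r) ++ frGlue t r w cs := by
  induction cs with
  | nil =>
    intro ws w
    simp only [List.foldl_nil, frGlue]
    by_cases hw : w = [] <;> simp [hw]
  | cons c cs ih =>
    intro ws w
    simp only [List.foldl_cons, frStep, frGlue]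
    by_cases hc : (fr_is_letter c || fr_is_digit c) = true
    · simp only [hc]
      exact ih ws (w ++ [c])
    · simp only [Bool.not_eq_true] at hc
      simp only [hc, Bool.false_eq_true, if_false]
      rw [ih]
      by_cases hw : w = [] <;> simp [hw, List.append_assoc]

-- flushing a nonempty pending word: it merges with the leading alphanumeric run
theorem glue_run (t r : List Char) (cs : List Char) :
    ∀ (w : List Char), w ≠ [] →
      frGlue t r w cs
        = fapp t r (w ++ cs.takeWhile fr_isAlnum) ++ frGlue t r [] (cs.dropWhile fr_isAlnum) := by
  induction cs with
  | nil => intro w hw; simp [frGlue, hw]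
  | cons c cs ih =>
    intro w hw
    by_cases hc : fr_isAlnum c = true
    · have hc' : (fr_is_letter c || fr_is_digit c) = true := hc
      rw [List.takeWhile_cons_of_pos hc, List.dropWhile_cons_of_pos hc]
      have h1 : frGlue t r w (c :: cs) = frGlue t r (w ++ [c]) cs := by
        simp only [frGlue, hc', if_true]
      rw [h1, ih (w ++ [c]) (by simp)]
      simp [List.append_assoc]
    · have hcf : fr_isAlnum c = false := by simpa using hc
      have hc' : (fr_is_letter c || fr_is_digit c) = false := hcf
      rw [List.takeWhile_cons_of_neg (by simp [hcf]), List.dropWhile_cons_of_neg (by simp [hcf])]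
      have h1 : frGlue t r w (c :: cs) = fapp t r w ++ (fapp t r [c] ++ frGlue t r [] cs) := by
        simp [frGlue, hc', hw, List.append_assoc]
      have h2 : frGlue t r [] (c :: cs) = fapp t r [c] ++ frGlue t r [] cs := by
        simp [frGlue, hc']
      rw [h1, h2, List.append_nil]

-- with no pending word, frGlue is exactly B's scan
theorem glue_tok (t r : List Char) (cs : List Char) :
    frGlue t r [] cs = frTok t r cs := by
  induction hn : cs.length using Nat.strong_induction_on generalizing cs with
  | _ n ih =>
    match cs with
    | [] => simp [frGlue, frTok]
    | c :: cs =>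
      rw [frTok]
      by_cases hc : fr_isAlnum c = true
      · have hc' : (fr_is_letter c || fr_is_digit c) = true := hc
        have h1 : frGlue t r [] (c :: cs) = frGlue t r [c] cs := by
          simp only [frGlue, hc', if_true, List.nil_append]
        rw [h1, glue_run t r cs [c] (by simp)]
        have hlen : (cs.dropWhile fr_isAlnum).length < n := by
          subst hn; exact Nat.lt_succ_of_le (List.length_dropWhile_le _ _)
        rw [ih _ hlen _ rfl]
        simp [fapp, hc]
      · have hcf : fr_isAlnum c = false := by simpa using hc
        have hc' : (fr_is_letter c || fr_is_digit c) = false := hcf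
        have h1 : frGlue t r [] (c :: cs) = fapp t r [c] ++ frGlue t r [] cs := by
          simp [frGlue, hc']
        have hlen : cs.length < n := by subst hn; exact Nat.lt_succ_self _
        rw [h1, ih _ hlen _ rfl]
        simp [fapp, hcf]

-- ===== VERDICT (by name: the statement is the Claim_ definition above) =====
theorem find_replace_spec : Claim_equal_find_replace := by
  intro s t r _
  unfold Spec_find_replace find_replace find_replace_alt
  simp only [foldl_fapp, List.nil_append]
  have h := foldA_glue t.toList r.toList s.toList [] []
  simp only [List.flatMap_nil, List.nil_append] at h
  rw [h, glue_tok]
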